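-- pv_equiv track=rewrite | github.com/sumikof/agent-delegator | orchestrator/agents/task_management.py | _group_dependencies
-- ===== SOURCE A (Python) =====
-- from typing import Any, Dict, List, Optional
--
-- def _group_dependencies(dependencies: List[str], context: Dict[str, Any]) -> List[List[str]]:
--     """Group dependencies for task splitting."""
--     dependency_groups = []
--
--     # Simple grouping: create groups based on dependency types
--     backend_deps = [dep for dep in dependencies if "backend" in dep.lower()]
--     frontend_deps = [dep for dep in dependencies if "frontend" in dep.lower()]
--     api_deps = [dep for dep in dependencies if "api" in dep.lower()]
--     other_deps = [dep for dep in dependencies if dep not in backend_deps + frontend_deps + api_deps]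
--
--     if backend_deps:
--         dependency_groups.append(backend_deps)
--     if frontend_deps:
--         dependency_groups.append(frontend_deps)
--     if api_deps:
--         dependency_groups.append(api_deps)
--     if other_deps:
--         dependency_groups.append(other_deps)
--
--     # If no specific groups, create single group
--     if not dependency_groups and dependencies:
--         dependency_groups.append(dependencies)
--
--     return dependency_groups
-- ===== SOURCE B (Python) =====
-- from typing import Any, Dict, List
--
-- def _group_dependencies(dependencies: List[str], context: Dict[str, Any]) -> List[List[str]]:
--     """Group dependencies for task splitting (single pass)."""
--     backend, frontend, api, other = [], [], [], []
--     for dep in dependencies: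
--         d = dep.lower()
--         matched = False
--         if "backend" in d:
--             backend.append(dep)
--             matched = True
--         if "frontend" in d:
--             frontend.append(dep)
--             matched = True
--         if "api" in d:
--             api.append(dep)
--             matched = True
--         if not matched:
--             other.append(dep)
--     return [group for group in (backend, frontend, api, other) if group]
-- ===== Notes on version B (the rewrite author's own statement) =====
-- stated objective: simpler
-- what changed: Replaced the four list comprehensions (the last of which rescans the concatenation of the first three for every dep) by one pass that lowercases each dep once and appends it to the matching buckets, then returns the non-empty buckets; the dead single-group fallback is dropped since every dep lands in some bucket.
import Mathlib
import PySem

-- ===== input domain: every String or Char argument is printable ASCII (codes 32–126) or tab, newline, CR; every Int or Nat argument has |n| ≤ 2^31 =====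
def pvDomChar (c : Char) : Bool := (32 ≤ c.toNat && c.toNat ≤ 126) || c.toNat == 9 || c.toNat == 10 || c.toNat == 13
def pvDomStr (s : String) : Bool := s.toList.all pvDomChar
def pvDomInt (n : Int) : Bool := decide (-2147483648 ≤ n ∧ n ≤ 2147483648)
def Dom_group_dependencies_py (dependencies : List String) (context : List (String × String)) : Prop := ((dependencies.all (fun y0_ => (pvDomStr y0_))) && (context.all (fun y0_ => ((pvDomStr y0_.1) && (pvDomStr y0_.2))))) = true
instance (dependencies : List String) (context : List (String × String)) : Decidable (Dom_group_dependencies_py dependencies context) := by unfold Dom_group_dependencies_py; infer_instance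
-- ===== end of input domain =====

-- B replaces A's four comprehensions (the last rescanning the concatenated category lists) by one
-- pass that lowercases each dep once and appends to the matching buckets, then keeps the non-empty
-- buckets; A's single-group fallback is dead code (every dep lands in some bucket) and B omits it.
-- Objective: simpler.

-- shared helper: '"<sub>" in dep.lower()' (appears verbatim in both Pythons)
def depMatches (sub dep : String) : Bool := PySem.Str.isIn sub (PySem.Str.lower dep)

-- ===== PORT A =====
def group_dependencies_py (dependencies : List String) (context : List (String × String)) : List (List String) :=
  let backend_deps := dependencies.filter (fun dep => depMatches "backend" dep)
  let frontend_deps := dependencies.filter (fun dep => depMatches "frontend" dep)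
  let api_deps := dependencies.filter (fun dep => depMatches "api" dep)
  let other_deps := dependencies.filter
    (fun dep => !((backend_deps ++ frontend_deps ++ api_deps).contains dep))
  let groups : List (List String) := []
  let groups := if backend_deps ≠ [] then groups ++ [backend_deps] else groups
  let groups := if frontend_deps ≠ [] then groups ++ [frontend_deps] else groups
  let groups := if api_deps ≠ [] then groups ++ [api_deps] else groups
  let groups := if other_deps ≠ [] then groups ++ [other_deps] else groups
  if groups = [] ∧ dependencies ≠ [] then groups ++ [dependencies] else groups

-- ===== PORT B =====
-- B-side helper: the body of B's single loop (four buckets, independent ifs, matched flag)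
def bStep (st : List String × List String × List String × List String) (dep : String) :
    List String × List String × List String × List String :=
  let d := PySem.Str.lower dep
  let matched := PySem.Str.isIn "backend" d || PySem.Str.isIn "frontend" d || PySem.Str.isIn "api" d
  let b := if PySem.Str.isIn "backend" d then st.1 ++ [dep] else st.1
  let f := if PySem.Str.isIn "frontend" d then st.2.1 ++ [dep] else st.2.1
  let a := if PySem.Str.isIn "api" d then st.2.2.1 ++ [dep] else st.2.2.1
  let o := if !matched then st.2.2.2 ++ [dep] else st.2.2.2
  (b, f, a, o)

def group_dependencies_py_alt (dependencies : List String) (context : List (String × String)) : List (List String) :=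
  let st := dependencies.foldl bStep ([], [], [], [])
  [st.1, st.2.1, st.2.2.1, st.2.2.2].filter (fun g => !g.isEmpty)

-- ===== PRECONDITION & SPEC =====
def Spec_group_dependencies_py (dependencies : List String) (context : List (String × String)) (out : List (List String)) : Prop := out = group_dependencies_py_alt dependencies context
instance (dependencies : List String) (context : List (String × String)) (out : List (List String)) : Decidable (Spec_group_dependencies_py dependencies context out) := by unfold Spec_group_dependencies_py; infer_instance

-- ===== CLAIM (what is proved, stated in full; the proofs are below) =====
def Claim_equal_group_dependencies_py : Prop := ∀ (dependencies : List String) (context : List (String × String)), Dom_group_dependencies_py dependencies context → Spec_group_dependencies_py dependencies context (group_dependencies_py dependencies context)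

-- ===== LEMMAS AND PROOFS =====

-- the "no category matches" predicate
def noMatch (dep : String) : Bool :=
  !(depMatches "backend" dep || depMatches "frontend" dep || depMatches "api" dep)

-- B's fold computes the four filters
theorem foldl_bStep (l : List String) (b f a o : List String) :
    l.foldl bStep (b, f, a, o) =
      (b ++ l.filter (fun dep => depMatches "backend" dep),
       f ++ l.filter (fun dep => depMatches "frontend" dep),
       a ++ l.filter (fun dep => depMatches "api" dep),
       o ++ l.filter noMatch) := by
  induction l generalizing b f a o with
  | nil => simp
  | cons x t ih =>
    rw [List.foldl_cons]
    cases hb : depMatches "backend" x <;> cases hf : depMatches "frontend" x <;>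
      cases ha : depMatches "api" x <;>
      simp_all [bStep, noMatch, depMatches]

-- A's 'other' filter predicate coincides with noMatch on elements of the list
theorem other_filter_eq (deps : List String) :
    deps.filter (fun dep =>
      !((deps.filter (fun d => depMatches "backend" d) ++
         deps.filter (fun d => depMatches "frontend" d) ++
         deps.filter (fun d => depMatches "api" d)).contains dep)) =
    deps.filter noMatch := by
  apply List.filter_congr
  intro dep hmem
  simp [noMatch, List.mem_filter, hmem, Bool.and_assoc]

-- if all four buckets are empty, the list is empty (A's fallback is unreachable)
theorem all_filters_empty (deps : List String)
    (h : deps.filter noMatch = [])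
    (hb : deps.filter (fun d => depMatches "backend" d) = [])
    (hf : deps.filter (fun d => depMatches "frontend" d) = [])
    (ha : deps.filter (fun d => depMatches "api" d) = []) : deps = [] := by
  cases deps with
  | nil => rfl
  | cons x t =>
    exfalso
    rw [List.filter_eq_nil_iff] at h hb hf ha
    have h1 := h x (List.mem_cons_self ..)
    have h2 := hb x (List.mem_cons_self ..)
    have h3 := hf x (List.mem_cons_self ..)
    have h4 := ha x (List.mem_cons_self ..)
    simp [noMatch, h2, h3, h4] at h1

-- ===== VERDICT (by name: the statement is the Claim_ definition above) =====
set_option maxHeartbeats 800000 in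
theorem group_dependencies_py_spec : Claim_equal_group_dependencies_py := by
  intro deps ctx _
  unfold Spec_group_dependencies_py
  simp only [group_dependencies_py, group_dependencies_py_alt]
  rw [other_filter_eq, foldl_bStep]
  simp only [List.nil_append]
  have key : deps.filter noMatch = [] →
      deps.filter (fun d => depMatches "backend" d) = [] →
      deps.filter (fun d => depMatches "frontend" d) = [] →
      deps.filter (fun d => depMatches "api" d) = [] → deps = [] :=
    all_filters_empty deps
  generalize hB : deps.filter (fun d => depMatches "backend" d) = B at key ⊢
  generalize hF : deps.filter (fun d => depMatches "frontend" d) = F at key ⊢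
  generalize hA : deps.filter (fun d => depMatches "api" d) = A at key ⊢
  generalize hO : deps.filter noMatch = O at key ⊢
  by_cases hb : B = [] <;> by_cases hf : F = [] <;> by_cases ha : A = [] <;>
    by_cases ho : O = [] <;>
    simp_all
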